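-- pv_equiv track=rewrite | github.com/James-Begin/AOC-2023 | Day5/PartA.py | updaterange
-- ===== SOURCE A (Python) =====
-- def updaterange(start, stop, mapping):
--
--     if stop <= start:
--         return []
--
--     for begin, end, diff in mapping:
--         if begin <= start < end and begin < stop <= end:
--             return [(start + diff, stop + diff)]
--
--         if stop <= begin or start >= end:
--             continue
--
--         return (updaterange(start, begin, mapping) + [(max(start, begin) + diff, min(stop, end) + diff)]
--             + updaterange(end, stop, mapping))
--
--     return [(start, stop)]
-- ===== SOURCE B (Python) =====
-- def updaterange(start, stop, mapping):
--     # Iterative worklist version: explicit stack of process/emit tasks replaces the recursion.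
--     result = []
--     stack = [(True, start, stop)]
--     while stack:
--         is_process, a, b = stack.pop()
--         if not is_process:
--             result.append((a, b))
--             continue
--         if b <= a:
--             continue
--         hit = None
--         for begin, end, diff in mapping:
--             if not (b <= begin or a >= end):
--                 hit = (begin, end, diff)
--                 break
--         if hit is None:
--             result.append((a, b))
--         else:
--             begin, end, diff = hit
--             if begin <= a and b <= end:
--                 result.append((a + diff, b + diff))
--             else:
--                 stack.append((True, end, b))
--                 stack.append((False, max(a, begin) + diff, min(b, end) + diff))
--                 stack.append((True, a, begin))
--     return result
-- ===== Notes on version B (the rewrite author's own statement) =====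
-- stated objective: alternative
-- what changed: Replaces A's self-recursive interval splitting with an explicit worklist loop over process/emit tasks (popped LIFO, children pushed in reverse), and replaces A's combined scan with a separate first-overlapping-entry search.
import Mathlib
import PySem

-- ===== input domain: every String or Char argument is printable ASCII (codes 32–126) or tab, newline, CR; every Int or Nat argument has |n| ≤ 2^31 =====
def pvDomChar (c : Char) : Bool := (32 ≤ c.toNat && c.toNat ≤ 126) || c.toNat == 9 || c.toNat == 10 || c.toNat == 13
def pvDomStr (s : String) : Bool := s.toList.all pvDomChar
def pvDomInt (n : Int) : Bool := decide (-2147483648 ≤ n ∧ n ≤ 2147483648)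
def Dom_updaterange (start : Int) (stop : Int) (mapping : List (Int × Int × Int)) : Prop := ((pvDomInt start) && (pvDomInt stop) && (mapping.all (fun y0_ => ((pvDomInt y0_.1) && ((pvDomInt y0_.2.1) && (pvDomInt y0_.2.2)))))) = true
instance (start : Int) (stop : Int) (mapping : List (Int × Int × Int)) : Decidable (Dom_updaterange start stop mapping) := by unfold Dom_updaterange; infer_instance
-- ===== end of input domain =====

-- B replaces A's recursion by an explicit worklist/stack loop with process/emit tasks (objective: alternative decomposition, same cost).

-- ===== PORT A =====
-- Literal port of A's recursion; the extra proof argument of the scan helper only carries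
-- the loop's context (start < stop) for termination.
mutual
def updaterange (start : Int) (stop : Int) (mapping : List (Int × Int × Int)) : List (Int × Int) :=
  if _h : stop ≤ start then []
  else updaterangeScanA start stop mapping mapping (by omega)
termination_by ((stop - start).toNat, mapping.length + 1)

def updaterangeScanA (start : Int) (stop : Int) (mapping : List (Int × Int × Int))
    (rest : List (Int × Int × Int)) (h : start < stop) : List (Int × Int) :=
  match rest with
  | [] => [(start, stop)]
  | (begin_, end_, diff) :: rest' =>
    if begin_ ≤ start ∧ start < end_ ∧ begin_ < stop ∧ stop ≤ end_ then
      [(start + diff, stop + diff)]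
    else if _hc : stop ≤ begin_ ∨ start ≥ end_ then
      updaterangeScanA start stop mapping rest' h
    else
      updaterange start begin_ mapping ++ [(max start begin_ + diff, min stop end_ + diff)]
        ++ updaterange end_ stop mapping
termination_by ((stop - start).toNat, rest.length)
decreasing_by
  · exact Prod.Lex.right _ (by simp)
  · apply Prod.Lex.left; omega
  · apply Prod.Lex.left; omega
end

-- ===== PORT B =====
-- find the first mapping entry overlapping (a, b) (B's inner for-loop with break)
def updaterangeFirstOverlap (a : Int) (b : Int) : List (Int × Int × Int) → Option (Int × Int × Int)
  | [] => none
  | (begin_, end_, diff) :: rest =>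
    if ¬ (b ≤ begin_ ∨ a ≥ end_) then some (begin_, end_, diff)
    else updaterangeFirstOverlap a b rest

-- termination measure for the worklist loop
def updaterangeTaskWeight : Bool × Int × Int → Nat
  | (false, _, _) => 1
  | (true, a, b) => 3 ^ (b - a).toNat

-- facts the loop's termination proof needs about a found overlap
theorem updaterangeFirstOverlap_some {a b g e d : Int} {m : List (Int × Int × Int)}
    (h : updaterangeFirstOverlap a b m = some (g, e, d)) : a < e ∧ g < b := by
  induction m with
  | nil => simp [updaterangeFirstOverlap] at h
  | cons p rest ih =>
    obtain ⟨pg, pe, pd⟩ := p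
    by_cases hov : ¬ (b ≤ pg ∨ a ≥ pe)
    · simp [updaterangeFirstOverlap, hov] at h
      obtain ⟨h1, h2, h3⟩ := h
      subst h1; subst h2; omega
    · simp [updaterangeFirstOverlap, hov] at h
      exact ih h

theorem updaterangePow3Bound {l1 l2 l : ℕ} (h1 : l1 < l) (h2 : l2 < l) (h3 : 2 ≤ l) :
    3 ^ l1 + 3 ^ l2 + 1 < 3 ^ l := by
  have e1 : 3 ^ l1 ≤ 3 ^ (l - 1) := Nat.pow_le_pow_right (by omega) (by omega)
  have e2 : 3 ^ l2 ≤ 3 ^ (l - 1) := Nat.pow_le_pow_right (by omega) (by omega)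
  have e3 : (3 : ℕ) ^ l = 3 * 3 ^ (l - 1) := by
    conv_lhs => rw [show l = (l - 1) + 1 by omega]
    rw [pow_succ]; ring
  have e4 : (3 : ℕ) ^ 1 ≤ 3 ^ (l - 1) := Nat.pow_le_pow_right (by omega) (by omega)
  simp at e4
  omega

-- the worklist loop: pop a task; emit tasks append to result, process tasks replay A's case split
def updaterangeLoop (mapping : List (Int × Int × Int)) (stack : List (Bool × Int × Int))
    (result : List (Int × Int)) : List (Int × Int) :=
  match stack with
  | [] => result
  | (false, a, b) :: rest => updaterangeLoop mapping rest (result ++ [(a, b)])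
  | (true, a, b) :: rest =>
    if b ≤ a then updaterangeLoop mapping rest result
    else
      match hov : updaterangeFirstOverlap a b mapping with
      | none => updaterangeLoop mapping rest (result ++ [(a, b)])
      | some (begin_, end_, diff) =>
        if begin_ ≤ a ∧ b ≤ end_ then
          updaterangeLoop mapping rest (result ++ [(a + diff, b + diff)])
        else
          updaterangeLoop mapping
            ((true, a, begin_) :: (false, max a begin_ + diff, min b end_ + diff) :: (true, end_, b) :: rest)
            result
termination_by (stack.map updaterangeTaskWeight).sum
decreasing_by
  · simp [updaterangeTaskWeight]
  · simp [updaterangeTaskWeight]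
  · simp [updaterangeTaskWeight]
  · simp [updaterangeTaskWeight]
  · simp [updaterangeTaskWeight]
    have hfacts := updaterangeFirstOverlap_some hov
    rename_i hb hnc
    have key := updaterangePow3Bound (l1 := (begin_ - a).toNat) (l2 := (b - end_).toNat)
      (l := (b - a).toNat) (by omega) (by omega) (by omega)
    omega

def updaterange_alt (start : Int) (stop : Int) (mapping : List (Int × Int × Int)) : List (Int × Int) :=
  updaterangeLoop mapping [(true, start, stop)] []

-- ===== PRECONDITION & SPEC =====
def Spec_updaterange (start : Int) (stop : Int) (mapping : List (Int × Int × Int)) (out : List (Int × Int)) : Prop := out = updaterange_alt start stop mapping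
instance (start : Int) (stop : Int) (mapping : List (Int × Int × Int)) (out : List (Int × Int)) : Decidable (Spec_updaterange start stop mapping out) := by unfold Spec_updaterange; infer_instance

-- ===== CLAIM (what is proved, stated in full; the proofs are below) =====
def Claim_equal_updaterange : Prop := ∀ (start : Int) (stop : Int) (mapping : List (Int × Int × Int)), Dom_updaterange start stop mapping → Spec_updaterange start stop mapping (updaterange start stop mapping)

-- ===== LEMMAS AND PROOFS =====

-- A's scan over the mapping list, characterized via the first overlapping entry
theorem updaterangeScanA_eq (start stop : Int) (mapping rest : List (Int × Int × Int)) (h : start < stop) :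
    updaterangeScanA start stop mapping rest h =
      match updaterangeFirstOverlap start stop rest with
      | none => [(start, stop)]
      | some (g, e, d) =>
        if g ≤ start ∧ stop ≤ e then [(start + d, stop + d)]
        else updaterange start g mapping ++ [(max start g + d, min stop e + d)]
          ++ updaterange e stop mapping := by
  induction rest with
  | nil => simp [updaterangeScanA, updaterangeFirstOverlap]
  | cons p rest' ih =>
    obtain ⟨g, e, d⟩ := p
    by_cases hov : ¬ (stop ≤ g ∨ start ≥ e)
    · rw [show updaterangeFirstOverlap start stop ((g, e, d) :: rest')
          = some (g, e, d) by simp [updaterangeFirstOverlap, hov]]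
      by_cases hc : g ≤ start ∧ stop ≤ e
      · rw [updaterangeScanA]
        rw [if_pos (by omega)]
        simp [hc]
      · rw [updaterangeScanA]
        rw [if_neg (by omega), dif_neg (by omega)]
        simp [hc]
    · rw [show updaterangeFirstOverlap start stop ((g, e, d) :: rest')
          = updaterangeFirstOverlap start stop rest' by simp [updaterangeFirstOverlap, hov]]
      rw [updaterangeScanA]
      rw [if_neg (by omega), dif_pos (by omega)]
      exact ih

-- A as a single case split on the first overlapping entry
theorem updaterange_eq_cases (start stop : Int) (mapping : List (Int × Int × Int)) :
    updaterange start stop mapping =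
      if stop ≤ start then []
      else
        match updaterangeFirstOverlap start stop mapping with
        | none => [(start, stop)]
        | some (g, e, d) =>
          if g ≤ start ∧ stop ≤ e then [(start + d, stop + d)]
          else updaterange start g mapping ++ [(max start g + d, min stop e + d)]
            ++ updaterange e stop mapping := by
  by_cases h : stop ≤ start
  · rw [updaterange, dif_pos h, if_pos h]
  · rw [updaterange, dif_neg h, if_neg h]
    exact updaterangeScanA_eq start stop mapping mapping (by omega)

-- what one task contributes to the output
def updaterangeTaskDenote (mapping : List (Int × Int × Int)) : Bool × Int × Int → List (Int × Int)
  | (false, a, b) => [(a, b)]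
  | (true, a, b) => updaterange a b mapping

-- loop invariant: the loop appends the denotations of the remaining tasks, in order
theorem updaterangeLoop_eq (mapping : List (Int × Int × Int)) (stack : List (Bool × Int × Int))
    (result : List (Int × Int)) :
    updaterangeLoop mapping stack result
      = result ++ (stack.map (updaterangeTaskDenote mapping)).flatten := by
  induction stack, result using updaterangeLoop.induct mapping with
  | case1 result => simp [updaterangeLoop]
  | case2 result a b rest ih =>
    rw [updaterangeLoop]
    simp [updaterangeTaskDenote, ih]
  | case3 result a b rest hba ih =>
    rw [updaterangeLoop]
    have hA : updaterange a b mapping = [] := by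
      rw [updaterange_eq_cases, if_pos hba]
    simp only [if_pos hba, ih]
    simp [updaterangeTaskDenote, hA]
  | case4 result a b rest hba hov ih =>
    have hA : updaterange a b mapping = [(a, b)] := by
      rw [updaterange_eq_cases, if_neg hba, hov]
    rw [updaterangeLoop, if_neg hba]
    split
    · rw [ih]; simp [updaterangeTaskDenote, hA]
    · rename_i heq; rw [hov] at heq; cases heq
  | case5 result a b rest hba begin_ end_ diff hov hc ih =>
    have hA : updaterange a b mapping = [(a + diff, b + diff)] := by
      rw [updaterange_eq_cases, if_neg hba, hov]; simp [hc]
    rw [updaterangeLoop, if_neg hba]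
    split
    · rename_i heq; rw [hov] at heq; cases heq
    · rename_i g e d heq
      rw [hov] at heq
      simp only [Option.some.injEq, Prod.mk.injEq] at heq
      obtain ⟨h1, h2, h3⟩ := heq
      subst h1; subst h2; subst h3
      rw [if_pos hc, ih]
      simp [updaterangeTaskDenote, hA]
  | case6 result a b rest hba begin_ end_ diff hov hc ih =>
    have hA : updaterange a b mapping
        = updaterange a begin_ mapping ++ [(max a begin_ + diff, min b end_ + diff)]
          ++ updaterange end_ b mapping := by
      rw [updaterange_eq_cases, if_neg hba, hov]; simp [hc]
    rw [updaterangeLoop, if_neg hba]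
    split
    · rename_i heq; rw [hov] at heq; cases heq
    · rename_i g e d heq
      rw [hov] at heq
      simp only [Option.some.injEq, Prod.mk.injEq] at heq
      obtain ⟨h1, h2, h3⟩ := heq
      subst h1; subst h2; subst h3
      rw [if_neg hc, ih]
      simp [updaterangeTaskDenote, hA]

-- ===== VERDICT (by name: the statement is the Claim_ definition above) =====
theorem updaterange_spec : Claim_equal_updaterange := by
  intro start stop mapping _
  unfold Spec_updaterange updaterange_alt
  rw [updaterangeLoop_eq]
  simp [updaterangeTaskDenote]
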